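-- pv_equiv track=rewrite | github.com/ISheepFr/QRCode | code_qr.py | cle
-- ===== SOURCE A (Python) =====
-- def retour_cle(k,A,B):
--     if k in A:
--         return 0
--     else:
--         return 1
--
-- def cle(N):
--     A = []
--     # pairs
--     for i in range(2, N + 1, 2):
--         A.append(i)
--     # impairs
--     B = []
--     for i in range(1, N + 1, 2):
--         B.append(i)
--
--     cle_tab = []
--
--     for i in range(0, N):
--         code_retour = retour_cle(i, A, B)
--         cle_tab.append(code_retour)
--
--     return cle_tab
-- ===== SOURCE B (Python) =====
-- def cle(N):
--     cle_tab = [1] * N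
--     cle_tab[2::2] = [0] * len(cle_tab[2::2])
--     return cle_tab
-- ===== Notes on version B (the rewrite author's own statement) =====
-- stated objective: simpler
-- what changed: B drops the evens/odds list construction and the per-index membership test entirely: it builds [1]*N up front and zeroes the even positions >= 2 with one strided slice assignment.
import Mathlib
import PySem

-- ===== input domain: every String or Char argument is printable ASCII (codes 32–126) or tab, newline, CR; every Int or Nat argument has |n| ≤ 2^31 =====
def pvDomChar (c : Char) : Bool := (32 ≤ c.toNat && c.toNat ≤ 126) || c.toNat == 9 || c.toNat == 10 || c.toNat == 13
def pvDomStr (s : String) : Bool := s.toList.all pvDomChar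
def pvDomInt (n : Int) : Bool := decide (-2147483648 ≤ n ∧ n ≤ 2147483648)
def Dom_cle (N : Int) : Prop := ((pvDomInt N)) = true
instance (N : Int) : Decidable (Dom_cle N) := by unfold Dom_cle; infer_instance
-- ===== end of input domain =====

-- B replaces A's per-index membership test against a built evens list by a bulk
-- construction: all ones, then a strided overwrite of the even positions ≥ 2 (objective: simpler).

-- ===== PORT A =====
def retour_cle (k : Int) (A B : List Int) : Int :=
  if k ∈ A then 0 else 1

def cle (N : Int) : List Int :=
  let A := (PySem.List.pyRange 2 (N + 1) 2).foldl (fun acc i => acc ++ [i]) []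
  let B := (PySem.List.pyRange 1 (N + 1) 2).foldl (fun acc i => acc ++ [i]) []
  (PySem.List.pyRange 0 N 1).foldl (fun acc i => acc ++ [retour_cle i A B]) []

-- ===== PORT B =====
-- cle_tab = [1] * N  (empty when N ≤ 0), then the strided slice assignment
-- cle_tab[2::2] = [0] * len(cle_tab[2::2]) is ported index-wise (exact: it
-- overwrites exactly the positions 2, 4, 6, … with 0).
def cle_alt (N : Int) : List Int :=
  (List.replicate N.toNat (1 : Int)).mapIdx
    (fun i x => if 2 ≤ i ∧ i % 2 = 0 then 0 else x)

-- ===== PRECONDITION & SPEC =====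
def Spec_cle (N : Int) (out : List Int) : Prop := out = cle_alt N
instance (N : Int) (out : List Int) : Decidable (Spec_cle N out) := by unfold Spec_cle; infer_instance

-- ===== CLAIM (what is proved, stated in full; the proofs are below) =====
def Claim_equal_cle : Prop := ∀ (N : Int), Dom_cle N → Spec_cle N (cle N)

-- ===== LEMMAS AND PROOFS =====

theorem mapIdx_replicate_eq_map_range {α β : Type} (f : Nat → α → β) (n : Nat) (a : α) :
    (List.replicate n a).mapIdx f = (List.range n).map (fun i => f i a) := by
  apply List.ext_getElem
  · simp
  · intro i h1 h2
    simp

-- ===== VERDICT =====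
theorem cle_spec : Claim_equal_cle := by
  intro N _
  unfold Spec_cle cle cle_alt
  simp only [PySem.List.foldl_append_singleton_eq_self, List.nil_append,
    PySem.List.foldl_append_singleton_eq_map]
  rw [mapIdx_replicate_eq_map_range]
  by_cases hN : N ≤ 0
  · rw [PySem.List.pyRange_one_eq_nil hN]
    have : N.toNat = 0 := by omega
    simp [this]
  · obtain ⟨n, rfl⟩ : ∃ n : Nat, N = (n : Int) := ⟨N.toNat, by omega⟩
    rw [PySem.List.pyRange_zero_natCast, Int.toNat_natCast, List.map_map]
    apply List.map_congr_left
    intro k hk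
    simp only [List.mem_range] at hk
    simp only [Function.comp, retour_cle]
    have hmem : ((k : Int) ∈ PySem.List.pyRange 2 ((n : Int) + 1) 2) ↔ (2 ≤ k ∧ k % 2 = 0) := by
      rw [PySem.List.mem_pyRange_iff_of_pos (by norm_num)]
      omega
    by_cases h : 2 ≤ k ∧ k % 2 = 0
    · rw [if_pos (hmem.mpr h), if_pos h]
    · rw [if_neg (fun hm => h (hmem.mp hm)), if_neg h]
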